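-- pv_equiv track=rewrite | github.com/christianvuye/py_micro_exercises | dsa/spaced_repetition/duplicate_groups_sr.py | duplicate_groups
-- ===== SOURCE A (Python) =====
-- def duplicate_groups(lst: list) -> dict[list]:
--     """
--     Finds all duplicate values in the input list and groups their indices.
--
--     Args:
--         lst (list): The list to search for duplicate values.
--
--     Returns:
--         dict[list]: A dictionary where each key is a duplicated value from the input list,
--                     and the corresponding value is a list of indices where that value occurs.
--                     Only values that appear more than once are included.
--     """
--     duplicate_values = {}
--     for index, value in enumerate(lst):
--         if value not in duplicate_values:
--             duplicate_values[value] = [index]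
--         else:
--             duplicate_values[value].append(index)
--     return {k: v for k, v in duplicate_values.items() if len(v) > 1}
-- ===== SOURCE B (Python) =====
-- def duplicate_groups(lst: list) -> dict[list]:
--     result = {}
--     seen = []
--     for value in lst:
--         if value not in seen:
--             seen.append(value)
--             idxs = [i for i, v in enumerate(lst) if v == value]
--             if len(idxs) > 1:
--                 result[value] = idxs
--     return result
-- ===== Notes on version B (the rewrite author's own statement) =====
-- stated objective: alternative
-- what changed: B keeps no index-grouping dict at all: at each first occurrence of a value it rescans the whole list to collect that value's indices (nested scans, O(n*u)), inserting a group only when it has more than one index, instead of A's single hash-grouping pass plus a final filter.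
import Mathlib
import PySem

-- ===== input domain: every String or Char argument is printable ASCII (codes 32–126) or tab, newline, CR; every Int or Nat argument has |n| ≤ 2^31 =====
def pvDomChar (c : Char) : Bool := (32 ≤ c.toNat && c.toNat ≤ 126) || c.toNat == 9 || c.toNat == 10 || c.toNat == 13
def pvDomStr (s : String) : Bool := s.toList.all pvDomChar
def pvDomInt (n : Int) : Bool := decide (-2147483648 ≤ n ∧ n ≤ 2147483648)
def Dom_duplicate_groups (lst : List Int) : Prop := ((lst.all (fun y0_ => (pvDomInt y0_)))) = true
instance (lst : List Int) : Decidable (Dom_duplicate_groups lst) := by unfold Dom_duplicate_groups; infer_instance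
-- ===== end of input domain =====

-- B replaces A's hash-grouping pass + final filter by a per-distinct-value rescan of the
-- whole list (nested scans, no grouping dict); same return value, no speed claim.

-- ===== PORT A =====
-- A: build a dict value -> all its indices (new key: [index]; existing key: append),
-- then keep only the entries whose index list has length > 1.
def duplicate_groups (lst : List Int) : List (Int × List Int) :=
  (((PySem.List.enumerate lst).foldl
    (fun d p =>
      if d.contains p.2 = false then d.insert p.2 [p.1]
      else d.insert p.2 (d.getD p.2 [] ++ [p.1]))
    PySem.Dict.empty).items).filter (fun kv => decide (1 < kv.2.length))

-- ===== PORT B =====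
-- B: walk lst keeping a 'seen' python list; at each first occurrence of value, rescan the
-- full list via the comprehension [i for i, v in enumerate(lst) if v == value] and insert
-- the group into the result only when it has more than one index.
def duplicate_groups_alt (lst : List Int) : List (Int × List Int) :=
  ((lst.foldl
    (fun (st : PySem.Dict Int (List Int) × List Int) value =>
      if st.2.contains value then st
      else
        let seen' := st.2 ++ [value]
        let idxs := ((PySem.List.enumerate lst).filter (fun p => p.2 == value)).map (fun p => p.1)
        if 1 < idxs.length then (st.1.insert value idxs, seen') else (st.1, seen'))
    (PySem.Dict.empty, [])).1).items

-- ===== PRECONDITION & SPEC =====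
def Spec_duplicate_groups (lst : List Int) (out : List (Int × List Int)) : Prop := out = duplicate_groups_alt lst
instance (lst : List Int) (out : List (Int × List Int)) : Decidable (Spec_duplicate_groups lst out) := by unfold Spec_duplicate_groups; infer_instance

-- ===== CLAIM =====
def Claim_equal_duplicate_groups : Prop := ∀ (lst : List Int), Dom_duplicate_groups lst → Spec_duplicate_groups lst (duplicate_groups lst)

-- ===== LEMMAS AND PROOFS =====

-- indices at which k occurs in lst
def pvIdx (lst : List Int) (k : Int) : List Int :=
  ((PySem.List.enumerate lst).filter (fun p => p.2 == k)).map (fun p => p.1)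

theorem pvIdx_length (lst : List Int) (k : Int) : (pvIdx lst k).length = lst.count k := by
  unfold pvIdx
  rw [List.length_map, ← List.countP_eq_length_filter]
  have h : lst.count k
      = List.countP (fun p => p.2 == k) (PySem.List.enumerate lst) := by
    conv_lhs => rw [← PySem.List.map_snd_enumerate lst 0]
    rw [List.count_eq_countP, List.countP_map]
    exact rfl
  rw [h]

-- A's grouping step is a modify
theorem stepA_eq_modify (d : PySem.Dict Int (List Int)) (p : Int × Int) :
    (if d.contains p.2 = false then d.insert p.2 [p.1]
     else d.insert p.2 (d.getD p.2 [] ++ [p.1])) = d.modify p.2 [] (fun v => v ++ [p.1]) := by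
  by_cases h : d.contains p.2
  · simp [h, PySem.Dict.modify]
  · simp only [h, if_pos]
    simp [PySem.Dict.modify, PySem.Dict.getD_of_not_contains d [] (by simpa using h)]

-- characterisation of a modify-append grouping loop over pairs keyed by .2
theorem group_items (l : List (Int × Int)) :
    (l.foldl (fun d p => d.modify p.2 [] (fun v => v ++ [p.1])) PySem.Dict.empty).items =
      (PySem.Set.ofList (l.map (fun p => p.2))).map
        (fun k => (k, (l.filter (fun p => p.2 == k)).map (fun p => p.1))) := by
  have hsw : l.foldl (fun d p => d.modify p.2 [] (fun v => v ++ [p.1])) PySem.Dict.empty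
      = (l.map Prod.swap).foldl (fun d p => d.modify p.1 [] (fun v => v ++ [p.2])) PySem.Dict.empty := by
    rw [List.foldl_map]
    simp only [Prod.fst_swap, Prod.snd_swap]
  rw [hsw]
  set D := (l.map Prod.swap).foldl (fun d p => d.modify p.1 [] (fun v => v ++ [p.2])) PySem.Dict.empty with hD
  have hkeys : D.keys = PySem.Set.ofList (l.map (fun p => p.2)) := by
    rw [hD, PySem.Dict.keys_foldl_modify_key (l.map Prod.swap) Prod.fst []
      (fun _ p => (fun v => v ++ [p.2])) PySem.Dict.empty]
    simp only [PySem.Set.update, PySem.Set.ofList, PySem.Set.empty, List.map_map,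
      PySem.Dict.keys_empty]
    rfl
  have hnd : D.keys.Nodup := by
    rw [hD]
    exact PySem.Dict.nodup_keys_foldl_modify_key _ Prod.fst []
      (fun _ p => (fun v => v ++ [p.2])) PySem.Dict.empty PySem.Dict.nodup_keys_empty
  have hget : ∀ k, D.getD k [] = (l.filter (fun p => p.2 == k)).map (fun p => p.1) := by
    intro k
    rw [hD, PySem.Dict.getD_foldl_modify_append (l.map Prod.swap) PySem.Dict.empty k]
    rw [List.filter_map, List.map_map]
    simp only [PySem.Dict.getD_empty, List.nil_append]
    rfl
  rw [PySem.Dict.items_eq_map_keys D hnd [], hkeys]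
  exact List.map_congr_left (fun k _ => by rw [hget k])

theorem pvA_eq (lst : List Int) :
    duplicate_groups lst =
      ((PySem.Set.ofList lst).filter (fun k => decide (1 < lst.count k))).map
        (fun k => (k, pvIdx lst k)) := by
  unfold duplicate_groups
  have hstep : (fun (d : PySem.Dict Int (List Int)) (p : Int × Int) =>
      if d.contains p.2 = false then d.insert p.2 [p.1]
      else d.insert p.2 (d.getD p.2 [] ++ [p.1]))
      = fun d p => d.modify p.2 [] (fun v => v ++ [p.1]) := by
    funext d p
    exact stepA_eq_modify d p
  rw [hstep, group_items (PySem.List.enumerate lst), PySem.List.map_snd_enumerate,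
    List.filter_map]
  congr 1
  apply List.filter_congr
  intro k _
  have h := pvIdx_length lst k
  unfold pvIdx at h
  simp only [Function.comp_apply, h]

-- invariant of B's loop: the result dict's items are the seen values with count > 1,
-- each paired with its full index list
theorem pvB_loop (lst : List Int) (l : List Int) (d : PySem.Dict Int (List Int)) (s : List Int)
    (h : d.items = (s.filter (fun k => decide (1 < lst.count k))).map (fun k => (k, pvIdx lst k))) :
    ((l.foldl
      (fun (st : PySem.Dict Int (List Int) × List Int) value =>
        if st.2.contains value then st
        else
          let seen' := st.2 ++ [value]
          let idxs := ((PySem.List.enumerate lst).filter (fun p => p.2 == value)).map (fun p => p.1)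
          if 1 < idxs.length then (st.1.insert value idxs, seen') else (st.1, seen'))
      (d, s)).1).items
      = ((l.foldl PySem.Set.add s).filter (fun k => decide (1 < lst.count k))).map
          (fun k => (k, pvIdx lst k)) := by
  induction l generalizing d s with
  | nil => simpa using h
  | cons x xs ih =>
    by_cases hm : x ∈ s
    · have hc : s.contains x = true := by simpa using hm
      have ha : PySem.Set.add s x = s := by
        simp [PySem.Set.add, PySem.Set.contains, hm]
      simp only [List.foldl_cons, hc, if_pos, ha]
      exact ih d s h
    · have hc : s.contains x = false := by simpa using hm
      have ha : PySem.Set.add s x = s ++ [x] := by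
        simp [PySem.Set.add, PySem.Set.contains, hm]
      have hlen : (((PySem.List.enumerate lst).filter (fun p => p.2 == x)).map
          (fun p => p.1)).length = lst.count x := pvIdx_length lst x
      have hdc : d.contains x = false := by
        by_contra hcc
        have : x ∈ d.keys := (PySem.Dict.contains_iff_mem_keys d x).1 (by
          cases hb : d.contains x
          · exact absurd hb hcc
          · rfl)
        rw [PySem.Dict.keys, h, List.map_map] at this
        have : x ∈ s.filter (fun k => decide (1 < lst.count k)) := by
          simpa using this
        exact hm (List.mem_of_mem_filter this)
      simp only [List.foldl_cons, hc, Bool.false_eq_true, if_false, ha]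
      by_cases hcnt : 1 < lst.count x
      · rw [hlen] at *
        simp only [hcnt, if_pos]
        apply ih
        rw [PySem.Dict.items_insert, hdc, h, List.filter_append]
        simp [pvIdx, hcnt]
      · rw [hlen] at *
        simp only [hcnt, if_false]
        apply ih
        rw [h, List.filter_append]
        simp [hcnt]

theorem pvB_eq (lst : List Int) :
    duplicate_groups_alt lst =
      ((PySem.Set.ofList lst).filter (fun k => decide (1 < lst.count k))).map
        (fun k => (k, pvIdx lst k)) := by
  unfold duplicate_groups_alt
  rw [pvB_loop lst lst PySem.Dict.empty [] (by rfl)]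
  rw [PySem.Set.ofList_eq_foldl]

-- ===== VERDICT =====
theorem duplicate_groups_spec : Claim_equal_duplicate_groups := by
  intro lst _
  unfold Spec_duplicate_groups
  rw [pvA_eq, pvB_eq]
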